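-- pv_equiv track=rewrite | github.com/ayushtiwari1526/TheReinforcers_AyushTiwari | ai-service/models/sentiment_analyzer_gemma.py | _extract_key_factors
-- ===== SOURCE A (Python) =====
-- def _extract_key_factors(text, sentiment):
--     """Extract key factors from text for display"""
--     factors = []
--     text_lower = text.lower()
--
--     # Positive factors
--     if any(word in text_lower for word in ['earnings', 'profit', 'revenue']):
--         factors.append('Earnings Impact')
--     if any(word in text_lower for word in ['growth', 'expand', 'surge']):
--         factors.append('Growth Indicators')
--     if any(word in text_lower for word in ['innovation', 'launch', 'technology']):
--         factors.append('Innovation Driver')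
--     if any(word in text_lower for word in ['upgrade', 'outperform', 'rating']):
--         factors.append('Analyst Rating')
--
--     # Negative factors
--     if any(word in text_lower for word in ['loss', 'decline', 'fall']):
--         factors.append('Revenue Concern')
--     if any(word in text_lower for word in ['risk', 'concern', 'fear']):
--         factors.append('Market Risk')
--     if any(word in text_lower for word in ['regulation', 'investigation', 'fine']):
--         factors.append('Regulatory Issue')
--
--     # Default factors if none found
--     if not factors:
--         if sentiment.lower() == 'positive':
--             factors = ['Positive Momentum', 'Bullish Sentiment']
--         elif sentiment.lower() == 'negative':
--             factors = ['Negative Pressure', 'Bearish Sentiment']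
--         else:
--             factors = ['Mixed Signals', 'Neutral Outlook']
--
--     return factors[:3]
-- ===== SOURCE B (Python) =====
-- _KEYWORD_LABELS = [
--     ('earnings', 'Earnings Impact'), ('profit', 'Earnings Impact'), ('revenue', 'Earnings Impact'),
--     ('growth', 'Growth Indicators'), ('expand', 'Growth Indicators'), ('surge', 'Growth Indicators'),
--     ('innovation', 'Innovation Driver'), ('launch', 'Innovation Driver'), ('technology', 'Innovation Driver'),
--     ('upgrade', 'Analyst Rating'), ('outperform', 'Analyst Rating'), ('rating', 'Analyst Rating'),
--     ('loss', 'Revenue Concern'), ('decline', 'Revenue Concern'), ('fall', 'Revenue Concern'),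
--     ('risk', 'Market Risk'), ('concern', 'Market Risk'), ('fear', 'Market Risk'),
--     ('regulation', 'Regulatory Issue'), ('investigation', 'Regulatory Issue'), ('fine', 'Regulatory Issue'),
-- ]
--
-- _LABEL_ORDER = ['Earnings Impact', 'Growth Indicators', 'Innovation Driver', 'Analyst Rating',
--                 'Revenue Concern', 'Market Risk', 'Regulatory Issue']
--
-- def _match_labels(t):
--     """Naive multi-pattern matcher: one left-to-right scan of t; at each position
--     record the label of every keyword that starts there."""
--     hit = set()
--     for i in range(len(t)):
--         for kw, label in _KEYWORD_LABELS:
--             if t.startswith(kw, i):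
--                 hit.add(label)
--     return hit
--
-- def _extract_key_factors(text, sentiment):
--     hit = _match_labels(text.lower())
--     factors = [label for label in _LABEL_ORDER if label in hit]
--     if not factors:
--         s = sentiment.lower()
--         if s == 'positive':
--             factors = ['Positive Momentum', 'Bullish Sentiment']
--         elif s == 'negative':
--             factors = ['Negative Pressure', 'Bearish Sentiment']
--         else:
--             factors = ['Mixed Signals', 'Neutral Outlook']
--     return factors[:3]
-- ===== Notes on version B (the rewrite author's own statement) =====
-- stated objective: alternative
-- what changed: Replaces A's seven independent substring-membership branches with a naive multi-pattern matcher: one left-to-right scan over the positions of the lowered text testing each keyword as a prefix at every position, collecting matched labels into a set, then filtering the fixed label order against that set; the default block stays an if/elif chain.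
import Mathlib
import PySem

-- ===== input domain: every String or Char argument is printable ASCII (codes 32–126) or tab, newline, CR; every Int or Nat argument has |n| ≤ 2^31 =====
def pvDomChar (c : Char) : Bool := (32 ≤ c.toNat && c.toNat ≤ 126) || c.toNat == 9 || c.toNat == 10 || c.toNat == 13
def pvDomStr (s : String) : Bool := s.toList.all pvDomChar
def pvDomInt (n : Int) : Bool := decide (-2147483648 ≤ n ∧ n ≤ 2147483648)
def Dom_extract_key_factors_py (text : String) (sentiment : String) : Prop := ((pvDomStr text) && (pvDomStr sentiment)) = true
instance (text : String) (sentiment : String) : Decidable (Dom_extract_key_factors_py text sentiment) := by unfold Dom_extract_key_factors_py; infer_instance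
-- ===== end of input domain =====

-- B replaces A's seven independent substring branches with a naive multi-pattern matcher:
-- one left-to-right scan over positions of the lowered text collecting hit labels into a set,
-- then a filter of the fixed label order — alternative algorithm, same behaviour.


-- ===== PORT A =====
def extract_key_factors_py (text : String) (sentiment : String) : List String :=
  let text_lower := PySem.Str.lower text
  let factors : List String := []
  let factors := if (["earnings", "profit", "revenue"].any (fun word => PySem.Str.isIn word text_lower))
    then factors ++ ["Earnings Impact"] else factors
  let factors := if (["growth", "expand", "surge"].any (fun word => PySem.Str.isIn word text_lower))
    then factors ++ ["Growth Indicators"] else factors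
  let factors := if (["innovation", "launch", "technology"].any (fun word => PySem.Str.isIn word text_lower))
    then factors ++ ["Innovation Driver"] else factors
  let factors := if (["upgrade", "outperform", "rating"].any (fun word => PySem.Str.isIn word text_lower))
    then factors ++ ["Analyst Rating"] else factors
  let factors := if (["loss", "decline", "fall"].any (fun word => PySem.Str.isIn word text_lower))
    then factors ++ ["Revenue Concern"] else factors
  let factors := if (["risk", "concern", "fear"].any (fun word => PySem.Str.isIn word text_lower))
    then factors ++ ["Market Risk"] else factors
  let factors := if (["regulation", "investigation", "fine"].any (fun word => PySem.Str.isIn word text_lower))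
    then factors ++ ["Regulatory Issue"] else factors
  let factors := if factors = [] then
      (if PySem.Str.lower sentiment = "positive" then ["Positive Momentum", "Bullish Sentiment"]
       else if PySem.Str.lower sentiment = "negative" then ["Negative Pressure", "Bearish Sentiment"]
       else ["Mixed Signals", "Neutral Outlook"])
    else factors
  PySem.List.slice factors none (some 3)

-- ===== PORT B =====
def pvKwLabels : List (String × String) :=
  [("earnings", "Earnings Impact"), ("profit", "Earnings Impact"), ("revenue", "Earnings Impact"),
   ("growth", "Growth Indicators"), ("expand", "Growth Indicators"), ("surge", "Growth Indicators"),
   ("innovation", "Innovation Driver"), ("launch", "Innovation Driver"), ("technology", "Innovation Driver"),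
   ("upgrade", "Analyst Rating"), ("outperform", "Analyst Rating"), ("rating", "Analyst Rating"),
   ("loss", "Revenue Concern"), ("decline", "Revenue Concern"), ("fall", "Revenue Concern"),
   ("risk", "Market Risk"), ("concern", "Market Risk"), ("fear", "Market Risk"),
   ("regulation", "Regulatory Issue"), ("investigation", "Regulatory Issue"), ("fine", "Regulatory Issue")]

def pvLabelOrder : List String :=
  ["Earnings Impact", "Growth Indicators", "Innovation Driver", "Analyst Rating",
   "Revenue Concern", "Market Risk", "Regulatory Issue"]

-- port of _match_labels: `t.startswith(kw, i)` (0 ≤ i ≤ len(t)) is exactly a prefix test on t[i:],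
-- ported as PySem.Chars.startswith on (toList t).drop i.
def pvMatchLabels (t : List Char) : PySem.Set String :=
  (List.range t.length).foldl
    (fun hit i =>
      pvKwLabels.foldl
        (fun hit p =>
          if PySem.Chars.startswith (t.drop i) p.1.toList then PySem.Set.add hit p.2 else hit)
        hit)
    PySem.Set.empty

def extract_key_factors_py_alt (text : String) (sentiment : String) : List String :=
  let hit := pvMatchLabels (PySem.Str.lower text).toList
  let factors := pvLabelOrder.filter (fun label => PySem.Set.contains hit label)
  let factors := if factors = [] then
      (let s := PySem.Str.lower sentiment
       if s = "positive" then ["Positive Momentum", "Bullish Sentiment"]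
       else if s = "negative" then ["Negative Pressure", "Bearish Sentiment"]
       else ["Mixed Signals", "Neutral Outlook"])
    else factors
  PySem.List.slice factors none (some 3)

-- ===== PRECONDITION & SPEC =====
def Spec_extract_key_factors_py (text : String) (sentiment : String) (out : List String) : Prop := out = extract_key_factors_py_alt text sentiment
instance (text : String) (sentiment : String) (out : List String) : Decidable (Spec_extract_key_factors_py text sentiment out) := by unfold Spec_extract_key_factors_py; infer_instance

-- ===== CLAIM =====
def Claim_equal_extract_key_factors_py : Prop := ∀ (text : String) (sentiment : String), Dom_extract_key_factors_py text sentiment → Spec_extract_key_factors_py text sentiment (extract_key_factors_py text sentiment)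

-- ===== LEMMAS AND PROOFS =====

-- membership after the inner fold over the keyword table
theorem mem_inner_fold (t : List Char) (i : Nat) (ps : List (String × String))
    (s : PySem.Set String) (L : String) :
    (L ∈ ps.foldl (fun hit p =>
        if PySem.Chars.startswith (t.drop i) p.1.toList then PySem.Set.add hit p.2 else hit) s)
    ↔ L ∈ s ∨ ∃ p ∈ ps, PySem.Chars.startswith (t.drop i) p.1.toList = true ∧ p.2 = L := by
  induction ps generalizing s with
  | nil => simp
  | cons p ps ih =>
    simp only [List.foldl_cons, ih]
    by_cases h : PySem.Chars.startswith (t.drop i) p.1.toList = true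
    · simp [h, PySem.Set.mem_add]
      try tauto
    · simp [h]
      try tauto

-- membership after the outer fold over positions
theorem mem_outer_fold (t : List Char) (l : List Nat) (s : PySem.Set String) (L : String) :
    (L ∈ l.foldl (fun hit i =>
        pvKwLabels.foldl (fun hit p =>
          if PySem.Chars.startswith (t.drop i) p.1.toList then PySem.Set.add hit p.2 else hit) hit) s)
    ↔ L ∈ s ∨ ∃ i ∈ l, ∃ p ∈ pvKwLabels,
        PySem.Chars.startswith (t.drop i) p.1.toList = true ∧ p.2 = L := by
  induction l generalizing s with
  | nil => simp
  | cons i l ih =>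
    simp only [List.foldl_cons, ih, mem_inner_fold, List.mem_cons]
    constructor
    · rintro ((h | ⟨p, hp, hs, hL⟩) | ⟨j, hj, hp⟩)
      · exact Or.inl h
      · exact Or.inr ⟨i, Or.inl rfl, p, hp, hs, hL⟩
      · exact Or.inr ⟨j, Or.inr hj, hp⟩
    · rintro (h | ⟨j, rfl | hj, hp⟩)
      · exact Or.inl (Or.inl h)
      · exact Or.inl (Or.inr hp)
      · exact Or.inr ⟨j, hj, hp⟩

theorem mem_pvMatchLabels (t : List Char) (L : String) :
    L ∈ pvMatchLabels t ↔
      ∃ i < t.length, ∃ p ∈ pvKwLabels,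
        PySem.Chars.startswith (t.drop i) p.1.toList = true ∧ p.2 = L := by
  unfold pvMatchLabels
  rw [mem_outer_fold]
  simp [PySem.Set.empty, List.mem_range]

-- bounded position scan = Python substring test, for nonempty keywords
theorem scan_iff_isIn (t : List Char) (kw : List Char) (hkw : kw ≠ []) :
    (∃ i < t.length, PySem.Chars.startswith (t.drop i) kw = true) ↔
      PySem.Chars.isIn kw t = true := by
  rw [← PySem.Chars.exists_prefix_drop_iff_isIn]
  constructor
  · rintro ⟨i, _, h⟩
    exact ⟨i, (PySem.Chars.startswith_iff _ _).mp h⟩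
  · rintro ⟨j, h⟩
    by_cases hj : j < t.length
    · exact ⟨j, hj, (PySem.Chars.startswith_iff _ _).mpr h⟩
    · exfalso
      have : t.drop j = [] := List.drop_eq_nil_of_le (by omega)
      rw [this] at h
      exact hkw (List.prefix_nil.mp h)

-- one hit-set membership fact per label
theorem contains_label (t : List Char) (L : String) (kws : List String)
    (hgroup : ∀ p ∈ pvKwLabels, p.2 = L ↔ p.1 ∈ kws)
    (hsub : ∀ kw ∈ kws, (kw, L) ∈ pvKwLabels)
    (hne : ∀ kw ∈ kws, kw.toList ≠ []) :
    PySem.Set.contains (pvMatchLabels t) L =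
      kws.any (fun w => PySem.Chars.isIn w.toList t) := by
  rw [Bool.eq_iff_iff, PySem.Set.contains_iff, mem_pvMatchLabels, List.any_eq_true]
  constructor
  · rintro ⟨i, hi, p, hp, hs, hL⟩
    refine ⟨p.1, (hgroup p hp).mp hL, ?_⟩
    exact (scan_iff_isIn t p.1.toList (hne _ ((hgroup p hp).mp hL))).mp ⟨i, hi, hs⟩
  · rintro ⟨kw, hkw, h⟩
    obtain ⟨i, hi, hs⟩ := (scan_iff_isIn t kw.toList (hne _ hkw)).mpr h
    exact ⟨i, hi, (kw, L), hsub kw hkw, hs, rfl⟩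

-- rewrite the conditional-append chain / filter into a common append normal form
theorem ifApp {α : Type} (c : Bool) (acc : List α) (x : α) :
    (if c = true then acc ++ [x] else acc) = acc ++ (cond c [x] []) := by
  cases c <;> simp

theorem ifSing {α : Type} (c : Bool) (a : α) :
    (if c = true then [a] else []) = cond c [a] [] := by
  cases c <;> simp

theorem ifCons {α : Type} (c : Bool) (a : α) (r : List α) :
    (if c = true then a :: r else r) = (cond c [a] []) ++ r := by
  cases c <;> simp

-- ===== VERDICT =====
theorem extract_key_factors_py_spec : Claim_equal_extract_key_factors_py := by
  intro text sentiment _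
  unfold Spec_extract_key_factors_py extract_key_factors_py extract_key_factors_py_alt
  simp only [pvLabelOrder, List.filter_cons, List.filter_nil]
  rw [contains_label _ "Earnings Impact" ["earnings", "profit", "revenue"] (by decide) (by decide) (by decide),
      contains_label _ "Growth Indicators" ["growth", "expand", "surge"] (by decide) (by decide) (by decide),
      contains_label _ "Innovation Driver" ["innovation", "launch", "technology"] (by decide) (by decide) (by decide),
      contains_label _ "Analyst Rating" ["upgrade", "outperform", "rating"] (by decide) (by decide) (by decide),
      contains_label _ "Revenue Concern" ["loss", "decline", "fall"] (by decide) (by decide) (by decide),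
      contains_label _ "Market Risk" ["risk", "concern", "fear"] (by decide) (by decide) (by decide),
      contains_label _ "Regulatory Issue" ["regulation", "investigation", "fine"] (by decide) (by decide) (by decide)]
  simp only [PySem.Str.isIn_eq, ifApp, ifSing]
  simp only [ifCons]
  simp only [List.append_assoc, List.nil_append]
  cases (["earnings", "profit", "revenue"].any fun word =>
      PySem.Chars.isIn word.toList (PySem.Str.lower text).toList) <;> simp
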